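-- pv_equiv track=rewrite | github.com/ethanluckett/projecteuler | problem51.py | in_same_family
-- ===== SOURCE A (Python) =====
-- def in_same_family(p1, p2, n_diffs):
--     if len(p1) != len(p2):
--         return False
--     diff_p1 = ''
--     diff_p2 = ''
--     counted_diffs = 0
--     for i in range(len(p1)):
--         if p1[i] != p2[i]:
--             counted_diffs += 1
--             if counted_diffs > n_diffs:
--                 return False
--             if diff_p1 == '':
--                 diff_p1 = p1[i]
--                 diff_p2 = p2[i]
--             elif p1[i] != diff_p1 or p2[i] != diff_p2:
--                 return False
--     if counted_diffs != n_diffs: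
--         return False
--     return True
-- ===== SOURCE B (Python) =====
-- def in_same_family(p1, p2, n_diffs):
--     if len(p1) != len(p2):
--         return False
--     # Histogram of aligned character pairs.
--     counts = {}
--     for pair in zip(p1, p2):
--         counts[pair] = counts.get(pair, 0) + 1
--     # Keep only the mismatching pairs; the family test reads off the histogram:
--     # at most one distinct mismatching pair, occurring exactly n_diffs times in total.
--     bad = {pair: c for pair, c in counts.items() if pair[0] != pair[1]}
--     return len(bad) <= 1 and sum(bad.values()) == n_diffs
-- ===== Notes on version B (the rewrite author's own statement) =====
-- stated objective: alternative
-- what changed: Replaces A's stateful early-exit scan (first-diff sentinel, running count, three return-False branches) by a histogram algorithm: build a dict counting every aligned character pair, restrict it to the mismatching pairs, and answer from the histogram alone (at most one distinct mismatching pair, and its total multiplicity equals n_diffs); no sequence of differences or first-diff state is ever kept.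
import Mathlib
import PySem

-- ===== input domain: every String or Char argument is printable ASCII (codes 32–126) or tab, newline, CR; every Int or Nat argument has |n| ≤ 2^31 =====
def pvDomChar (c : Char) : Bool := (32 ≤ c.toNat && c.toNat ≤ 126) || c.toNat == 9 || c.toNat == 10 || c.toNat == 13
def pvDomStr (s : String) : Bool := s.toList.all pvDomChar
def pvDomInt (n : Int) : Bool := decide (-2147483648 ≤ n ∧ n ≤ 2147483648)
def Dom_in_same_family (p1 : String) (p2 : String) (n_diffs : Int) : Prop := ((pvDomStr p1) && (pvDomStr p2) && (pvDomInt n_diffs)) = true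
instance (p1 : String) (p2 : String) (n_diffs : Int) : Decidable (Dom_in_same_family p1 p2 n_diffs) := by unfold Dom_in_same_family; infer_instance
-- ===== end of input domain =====

-- B replaces A's stateful early-exit scan by a histogram: count every aligned character pair in a
-- dict, restrict it to mismatching pairs, and read count/uniformity off it; objective: alternative.

-- ===== PORT A =====
-- A's for-loop over i in range(len(p1)), transcribed as simultaneous recursion over the two
-- character lists (faithful: the loop only runs after the equal-length guard). State: the
-- first differing pair (diff_p1/diff_p2, '' sentinel = none) and the running count.
def pvLoopA : List Char → List Char → Option (Char × Char) → Int → Int → Bool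
  | [], _, _, c, n => decide (c = n)
  | _ :: _, [], _, c, n => decide (c = n)
  | a :: xs, b :: ys, none, c, n =>
    if a ≠ b then
      (if c + 1 > n then false else pvLoopA xs ys (some (a, b)) (c + 1) n)
    else pvLoopA xs ys none c n
  | a :: xs, b :: ys, some (u, v), c, n =>
    if a ≠ b then
      (if c + 1 > n then false
       else if a ≠ u ∨ b ≠ v then false else pvLoopA xs ys (some (u, v)) (c + 1) n)
    else pvLoopA xs ys (some (u, v)) c n

def in_same_family (p1 : String) (p2 : String) (n_diffs : Int) : Bool :=
  if PySem.Str.len p1 ≠ PySem.Str.len p2 then false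
  else pvLoopA p1.toList p2.toList none 0 n_diffs

-- ===== PORT B =====
-- Source B: counts = {}; for pair in zip(p1,p2): counts[pair] = counts.get(pair,0)+1;
-- bad = {pair: c for pair, c in counts.items() if pair[0] != pair[1]};
-- return len(bad) <= 1 and sum(bad.values()) == n_diffs
def in_same_family_alt (p1 : String) (p2 : String) (n_diffs : Int) : Bool :=
  if PySem.Str.len p1 ≠ PySem.Str.len p2 then false
  else
    let counts := (p1.toList.zip p2.toList).foldl
      (fun d pr => d.insert pr (d.getD pr 0 + 1)) PySem.Dict.empty
    let bad := PySem.Dict.mk (counts.items.filter (fun p => p.1.1 ≠ p.1.2))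
    decide (bad.size ≤ 1) && decide (bad.values.sum = n_diffs)

-- ===== PRECONDITION & SPEC =====
def Spec_in_same_family (p1 : String) (p2 : String) (n_diffs : Int) (out : Bool) : Prop := out = in_same_family_alt p1 p2 n_diffs
instance (p1 : String) (p2 : String) (n_diffs : Int) (out : Bool) : Decidable (Spec_in_same_family p1 p2 n_diffs out) := by unfold Spec_in_same_family; infer_instance

-- ===== CLAIM (what is proved, stated in full; the proofs are below) =====
def Claim_equal_in_same_family : Prop := ∀ (p1 : String) (p2 : String) (n_diffs : Int), Dom_in_same_family p1 p2 n_diffs → Spec_in_same_family p1 p2 n_diffs (in_same_family p1 p2 n_diffs)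

-- ===== LEMMAS AND PROOFS =====

-- "all elements of l are pairwise equal"
abbrev pvAllEq (l : List (Char × Char)) : Prop := ∀ p ∈ l, ∀ q ∈ l, p = q

-- a Nodup list with the same members as l has length ≤ 1 iff l's elements are pairwise equal
lemma pvNodupLen_le_one_iff (s l : List (Char × Char)) (hnd : s.Nodup)
    (hmem : ∀ x, x ∈ s ↔ x ∈ l) : s.length ≤ 1 ↔ pvAllEq l := by
  constructor
  · intro h p hp q hq
    have hps : p ∈ s := (hmem p).mpr hp
    have hqs : q ∈ s := (hmem q).mpr hq
    match s, h, hps, hqs with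
    | [], _, hps, _ => simp at hps
    | [x], _, hps, hqs =>
      simp at hps hqs; rw [hps, hqs]
    | x :: y :: t, h, _, _ => simp at h
  · intro h
    match s, hnd, hmem with
    | [], _, _ => simp
    | [x], _, _ => simp
    | x :: y :: t, hnd, hmem =>
      exfalso
      rw [List.nodup_cons] at hnd
      have hxy : x ≠ y := fun he => hnd.1 (he ▸ List.mem_cons_self)
      have hx : x ∈ l := (hmem x).mp (by simp)
      have hy : y ∈ l := (hmem y).mp (by simp)
      exact hxy (h x hx y hy)

lemma pvAllEq_dup (x : Char × Char) (t : List (Char × Char)) :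
    pvAllEq (x :: t) ↔ pvAllEq (x :: x :: t) := by
  unfold pvAllEq
  have hm : ∀ p : Char × Char, p ∈ x :: x :: t ↔ p ∈ x :: t := by
    intro p; simp only [List.mem_cons]; tauto
  constructor
  · intro h p hp q hq; exact h p ((hm p).mp hp) q ((hm q).mp hq)
  · intro h p hp q hq; exact h p ((hm p).mpr hp) q ((hm q).mpr hq)

-- characterization of A's loop: exact diff count and uniformity of the diff pairs
lemma pvLoopA_eq (xs ys : List Char) (d : Option (Char × Char)) (c n : Int) :
    pvLoopA xs ys d c n =
      (decide (c + (((xs.zip ys).filter (fun p => p.1 ≠ p.2)).length : Int) = n) &&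
       decide (pvAllEq (d.toList ++ (xs.zip ys).filter (fun p => p.1 ≠ p.2)))) := by
  induction xs generalizing ys d c with
  | nil => cases d <;> simp [pvLoopA, pvAllEq]
  | cons a xs ih =>
    match ys with
    | [] => cases d <;> simp [pvLoopA, pvAllEq]
    | b :: ys =>
      by_cases hab : a = b
      · have hfe : ((a, b) :: xs.zip ys).filter (fun p => p.1 ≠ p.2)
            = (xs.zip ys).filter (fun p => p.1 ≠ p.2) := by
          simp [hab]
        cases d with
        | none =>
          rw [show pvLoopA (a :: xs) (b :: ys) none c n
              = if a ≠ b then (if c + 1 > n then false else pvLoopA xs ys (some (a, b)) (c + 1) n)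
                else pvLoopA xs ys none c n from rfl]
          rw [if_neg (by simpa using hab), List.zip_cons_cons, hfe, ih]
        | some uv =>
          obtain ⟨u, v⟩ := uv
          rw [show pvLoopA (a :: xs) (b :: ys) (some (u, v)) c n
              = if a ≠ b then (if c + 1 > n then false
                  else if a ≠ u ∨ b ≠ v then false else pvLoopA xs ys (some (u, v)) (c + 1) n)
                else pvLoopA xs ys (some (u, v)) c n from rfl]
          rw [if_neg (by simpa using hab), List.zip_cons_cons, hfe, ih]
      · have hfe : ((a, b) :: xs.zip ys).filter (fun p => p.1 ≠ p.2)
            = (a, b) :: (xs.zip ys).filter (fun p => p.1 ≠ p.2) := by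
          simp [hab]
        by_cases hc : c + 1 > n
        · have hcount : ¬ (c + ((((a, b) :: xs.zip ys).filter (fun p => p.1 ≠ p.2)).length : Int) = n) := by
            rw [hfe]; simp only [List.length_cons]; push_cast; omega
          have hrhs : (decide (c + ((((a, b) :: xs.zip ys).filter (fun p => p.1 ≠ p.2)).length : Int) = n) &&
              decide (pvAllEq (d.toList ++ ((a, b) :: xs.zip ys).filter (fun p => p.1 ≠ p.2)))) = false := by
            simp only [decide_eq_false hcount, Bool.false_and]
          rw [List.zip_cons_cons, hrhs]
          cases d with
          | none =>
            rw [show pvLoopA (a :: xs) (b :: ys) none c n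
                = if a ≠ b then (if c + 1 > n then false else pvLoopA xs ys (some (a, b)) (c + 1) n)
                  else pvLoopA xs ys none c n from rfl]
            rw [if_pos (by simpa using hab), if_pos hc]
          | some uv =>
            obtain ⟨u, v⟩ := uv
            rw [show pvLoopA (a :: xs) (b :: ys) (some (u, v)) c n
                = if a ≠ b then (if c + 1 > n then false
                    else if a ≠ u ∨ b ≠ v then false else pvLoopA xs ys (some (u, v)) (c + 1) n)
                  else pvLoopA xs ys (some (u, v)) c n from rfl]
            rw [if_pos (by simpa using hab), if_pos hc]
        · have hcnt : ∀ (L : Nat), ((c + 1) + (L : Int) = n ↔ c + (((L + 1 : Nat)) : Int) = n) := by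
            intro L; push_cast; omega
          cases d with
          | none =>
            rw [show pvLoopA (a :: xs) (b :: ys) none c n
                = if a ≠ b then (if c + 1 > n then false else pvLoopA xs ys (some (a, b)) (c + 1) n)
                  else pvLoopA xs ys none c n from rfl]
            rw [if_pos (by simpa using hab), if_neg hc, ih, List.zip_cons_cons, hfe]
            congr 1
            · simp only [List.length_cons]
              exact decide_eq_decide.mpr (hcnt _)
          | some uv =>
            obtain ⟨u, v⟩ := uv
            rw [show pvLoopA (a :: xs) (b :: ys) (some (u, v)) c n
                = if a ≠ b then (if c + 1 > n then false
                    else if a ≠ u ∨ b ≠ v then false else pvLoopA xs ys (some (u, v)) (c + 1) n)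
                  else pvLoopA xs ys (some (u, v)) c n from rfl]
            rw [if_pos (by simpa using hab), if_neg hc, List.zip_cons_cons, hfe]
            by_cases huv : a ≠ u ∨ b ≠ v
            · rw [if_pos huv]
              have hne : (u, v) ≠ (a, b) := by
                intro h'
                rcases huv with h | h
                · exact h (congrArg Prod.fst h').symm
                · exact h (congrArg Prod.snd h').symm
              have hnall : ¬ pvAllEq ((some (u, v)).toList ++ (a, b) :: (xs.zip ys).filter (fun p => p.1 ≠ p.2)) := by
                intro h
                exact hne (h (u, v) (by simp) (a, b) (by simp))
              simp only [decide_eq_false hnall, Bool.and_false]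
            · rw [if_neg huv]
              rw [not_or, not_not, not_not] at huv
              obtain ⟨hu, hv⟩ := huv
              subst hu; subst hv
              rw [ih]
              congr 1
              · simp only [List.length_cons]
                exact decide_eq_decide.mpr (hcnt _)
              · exact decide_eq_decide.mpr (pvAllEq_dup (a, b) _)

-- B's "bad" dict items = the distinct mismatching pairs of z, each with its count in z
lemma pvBad_items (z : List (Char × Char)) :
    ((z.foldl (fun d pr => d.insert pr (d.getD pr 0 + 1)) PySem.Dict.empty).items.filter
        (fun p => p.1.1 ≠ p.1.2))
      = ((PySem.Set.ofList z).filter (fun k => k.1 ≠ k.2)).map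
          (fun k => (k, (z.count k : Int))) := by
  rw [PySem.Dict.foldl_insert_getD_add_one_eq_counter, PySem.Dict.items_counter]
  rw [List.filter_map]
  rfl

-- sum of the counts of the distinct mismatching pairs = number of mismatching positions
lemma pvBad_sum (z : List (Char × Char)) :
    ((((PySem.Set.ofList z).filter (fun k => k.1 ≠ k.2)).map
        (fun k => (z.count k : Int))).sum : Int)
      = ((z.filter (fun p => p.1 ≠ p.2)).length : Int) := by
  set s := (PySem.Set.ofList z).filter (fun k => k.1 ≠ k.2) with hs
  have hnd : s.Nodup := (PySem.Set.nodup_ofList z).filter _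
  have hcnt : ∀ k ∈ s, z.count k = (z.filter (fun p => p.1 ≠ p.2)).count k := by
    intro k hk
    have hq : (k.1 ≠ k.2) := by
      have := List.of_mem_filter hk
      simpa using this
    rw [List.count_filter]
    simp [hq]
  have hmap : s.map (fun k => (z.count k : Int))
      = s.map (fun k => (((z.filter (fun p => p.1 ≠ p.2)).count k : Nat) : Int)) := by
    apply List.map_congr_left
    intro k hk
    rw [hcnt k hk]
  rw [hmap]
  have hnatmap : s.map (fun k => (((z.filter (fun p => p.1 ≠ p.2)).count k : Nat) : Int))
      = (s.map (fun k => (z.filter (fun p => p.1 ≠ p.2)).count k)).map (Nat.cast) := by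
    rw [List.map_map]; rfl
  rw [hnatmap, ← Nat.cast_list_sum]
  congr 1
  -- Nat identity: ∑_{k ∈ s} m.count k = m.length, where m = z.filter q, s its distinct members
  set m := z.filter (fun p => p.1 ≠ p.2) with hm
  have hmem : ∀ x, x ∈ s ↔ x ∈ m := by
    intro x
    rw [hs, hm, List.mem_filter, List.mem_filter, PySem.Set.mem_ofList]
  have hfin : s.toFinset = m.toFinset := by
    apply Finset.ext
    intro x
    simp only [List.mem_toFinset]
    exact hmem x
  have h1 : (s.map (fun k => m.count k)).sum = s.toFinset.sum (fun k => m.count k) :=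
    (List.sum_toFinset _ hnd).symm
  have hconv : ∀ (a : Char × Char) (l : List (Char × Char)),
      l.count a = @List.count _ instBEqOfDecidableEq a l := by
    intro a l
    induction l with
    | nil => rfl
    | cons x xs ih => simp [List.count_cons, ih]
  rw [h1, hfin]
  exact (Finset.sum_congr rfl (fun k _ => hconv k m)).trans (List.sum_toFinset_count_eq_length m)

-- ===== VERDICT (by name: the statement is the Claim_ definition above) =====
theorem in_same_family_spec : Claim_equal_in_same_family := by
  unfold Claim_equal_in_same_family
  intro p1 p2 n _
  unfold Spec_in_same_family in_same_family in_same_family_alt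
  by_cases hlen : PySem.Str.len p1 ≠ PySem.Str.len p2
  · rw [if_pos hlen, if_pos hlen]
  · rw [if_neg hlen, if_neg hlen]
    rw [pvLoopA_eq]
    simp only [Option.toList, List.nil_append, zero_add]
    set z := p1.toList.zip p2.toList with hz
    simp only [PySem.Dict.size, PySem.Dict.values, pvBad_items]
    set s := (PySem.Set.ofList z).filter (fun k => k.1 ≠ k.2) with hs
    have hnd : s.Nodup := (PySem.Set.nodup_ofList z).filter _
    have hmem : ∀ x, x ∈ s ↔ x ∈ z.filter (fun p => p.1 ≠ p.2) := by
      intro x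
      rw [hs, List.mem_filter, List.mem_filter, PySem.Set.mem_ofList]
    have h1 : decide ((s.map (fun k => ((k, (z.count k : Int)) : (Char × Char) × Int))).length ≤ 1)
        = decide (pvAllEq (z.filter (fun p => p.1 ≠ p.2))) := by
      rw [List.length_map]
      exact decide_eq_decide.mpr (pvNodupLen_le_one_iff s _ hnd hmem)
    have h2 : decide (((s.map (fun k => ((k, (z.count k : Int)) : (Char × Char) × Int))).map (fun x => x.2)).sum = n)
        = decide ((((z.filter (fun p => p.1 ≠ p.2)).length : Int)) = n) := by
      rw [List.map_map]
      have he : s.map ((fun x => x.2) ∘ fun k => ((k, (z.count k : Int)) : (Char × Char) × Int))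
          = s.map (fun k => (z.count k : Int)) := rfl
      rw [he, pvBad_sum]
    rw [h1, h2, Bool.and_comm]
    rfl
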